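-- pv_equiv track=rewrite | github.com/dmob123/CS-Capstone-499 | pchessMod.py | explain_fen
-- ===== SOURCE A (Python) =====
-- def explain_fen(fen):
--     parts = fen.split(' ')  # Split the FEN string into its components
--     board, turn, castling, en_passant, halfmove, fullmove = parts
--     board_rows = board.split('/')   # Translate the board part of FEN to a more understandable format
--     board_explanation = "Board setup:\n"
--     for row in board_rows:
--         readable_row = row.replace('1', '.').replace('2', '..').replace('3', '...').replace('4', '....').replace('5', '.....').replace('6', '......').replace('7', '.......').replace('8', '........')
--         board_explanation += f"{readable_row}\n"
--     turn_explanation = "White's turn" if turn == 'w' else "Black's turn"    # Explain whose turn it is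
--     castling_explanation = "Castling rights: " + (castling if castling != '-' else 'None')  # Explain castling rights
--     en_passant_explanation = "En passant target square: " + (en_passant if en_passant != '-' else 'None')   # Explain en passant target square
--     halfmove_explanation = f"Halfmove clock (for 50-move rule): {halfmove}" # Explain halfmove clock (steps since last capture or pawn move)
--     fullmove_explanation = f"Fullmove number: {fullmove}"   # Explain fullmove number (incremented after Black's turn)
--     explanation = f"{board_explanation}\n{turn_explanation}\n{castling_explanation}\n{en_passant_explanation}\n{halfmove_explanation}\n{fullmove_explanation}"  # Combine all explanations into one string
--     return explanation
-- ===== SOURCE B (Python) =====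
-- def explain_fen(fen):
--     board, turn, castling, en_passant, halfmove, fullmove = fen.split(' ')
--     board_explanation = "Board setup:\n" + ''.join(
--         ''.join('.' * int(c) if c in '12345678' else c for c in row) + '\n'
--         for row in board.split('/'))
--     turn_explanation = "White's turn" if turn == 'w' else "Black's turn"
--     castling_explanation = "Castling rights: " + (castling if castling != '-' else 'None')
--     en_passant_explanation = "En passant target square: " + (en_passant if en_passant != '-' else 'None')
--     halfmove_explanation = "Halfmove clock (for 50-move rule): " + halfmove
--     fullmove_explanation = "Fullmove number: " + fullmove
--     return "\n".join([board_explanation, turn_explanation, castling_explanation,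
--                       en_passant_explanation, halfmove_explanation, fullmove_explanation])
-- ===== Notes on version B (the rewrite author's own statement) =====
-- stated objective: simpler
-- what changed: The chained row.replace('1','.')...('8','........') expansion is replaced by a single pass over each row's characters (emit '.'*int(c) for digits '1'-'8', the char otherwise), and the += string accumulation is replaced by join over comprehensions.
-- outside the precondition, e.g. on explain_fen(' '): A raises ValueError, B raises ValueError; on explain_fen('1'): A raises ValueError, B raises ValueError; on explain_fen('.'): A raises ValueError, B raises ValueError
import Mathlib
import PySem

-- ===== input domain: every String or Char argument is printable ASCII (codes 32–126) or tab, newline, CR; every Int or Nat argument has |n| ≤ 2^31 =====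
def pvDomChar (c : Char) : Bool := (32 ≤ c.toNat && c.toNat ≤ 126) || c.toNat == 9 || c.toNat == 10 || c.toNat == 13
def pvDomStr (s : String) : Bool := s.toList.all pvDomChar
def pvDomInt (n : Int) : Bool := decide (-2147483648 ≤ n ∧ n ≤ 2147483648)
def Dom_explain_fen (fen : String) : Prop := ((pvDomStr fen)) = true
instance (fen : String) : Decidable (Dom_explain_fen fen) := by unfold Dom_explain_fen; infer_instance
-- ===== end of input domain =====

-- B replaces A's chained row.replace('1','.')…('8','........') with one per-character pass
-- joined with str.join; objective: simpler (same cost, one scan of each row instead of eight).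

-- ===== PORT A =====
-- A-side helper: the chained .replace line, exact (PySem.Chars.replace = str.replace)
def pvChainA (row : List Char) : List Char :=
  PySem.Chars.replace (PySem.Chars.replace (PySem.Chars.replace (PySem.Chars.replace
    (PySem.Chars.replace (PySem.Chars.replace (PySem.Chars.replace (PySem.Chars.replace
      row ['1'] ['.']) ['2'] ['.','.']) ['3'] ['.','.','.']) ['4'] ['.','.','.','.'])
      ['5'] ['.','.','.','.','.']) ['6'] ['.','.','.','.','.','.'])
      ['7'] ['.','.','.','.','.','.','.']) ['8'] ['.','.','.','.','.','.','.','.']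

def explain_fen (fen : String) : String :=
  match PySem.Chars.splitOn fen.toList [' '] with
  | [board, turn, castling, en_passant, halfmove, fullmove] =>
    let board_rows := PySem.Chars.splitOn board ['/']
    let board_explanation := board_rows.foldl
      (fun acc row => acc ++ pvChainA row ++ ['\n']) ("Board setup:\n".toList)
    let turn_explanation := if turn = ['w'] then "White's turn".toList else "Black's turn".toList
    let castling_explanation := "Castling rights: ".toList ++ (if castling ≠ ['-'] then castling else "None".toList)
    let en_passant_explanation := "En passant target square: ".toList ++ (if en_passant ≠ ['-'] then en_passant else "None".toList)
    let halfmove_explanation := "Halfmove clock (for 50-move rule): ".toList ++ halfmove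
    let fullmove_explanation := "Fullmove number: ".toList ++ fullmove
    String.ofList (board_explanation ++ ['\n'] ++ turn_explanation ++ ['\n'] ++ castling_explanation
      ++ ['\n'] ++ en_passant_explanation ++ ['\n'] ++ halfmove_explanation ++ ['\n'] ++ fullmove_explanation)
  | _ => ""   -- Python raises ValueError here (unpack of ≠ 6 parts); excluded by Pre_

-- ===== PORT B =====
-- B-side helper: one pass over the row's characters; '.' * int(c) for c ∈ '1'..'8' is
-- List.replicate (c.toNat - 48) '.' (exact on that guarded range).
def pvExpandB (row : List Char) : List Char :=
  PySem.Chars.join [] (row.map (fun c =>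
    if c ∈ ['1','2','3','4','5','6','7','8'] then List.replicate (c.toNat - 48) '.' else [c]))

def explain_fen_alt (fen : String) : String :=
  -- the 6-variable unpacking, read as: exactly 6 parts (else Python raises ValueError), bound positionally
  let ps := PySem.Chars.splitOn fen.toList [' ']
  if ps.length = 6 then
    let board := ps.getD 0 []
    let turn := ps.getD 1 []
    let castling := ps.getD 2 []
    let en_passant := ps.getD 3 []
    let halfmove := ps.getD 4 []
    let fullmove := ps.getD 5 []
    let board_explanation := "Board setup:\n".toList ++
      PySem.Chars.join [] ((PySem.Chars.splitOn board ['/']).map (fun row => pvExpandB row ++ ['\n']))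
    let turn_explanation := if turn = ['w'] then "White's turn".toList else "Black's turn".toList
    let castling_explanation := "Castling rights: ".toList ++ (if castling ≠ ['-'] then castling else "None".toList)
    let en_passant_explanation := "En passant target square: ".toList ++ (if en_passant ≠ ['-'] then en_passant else "None".toList)
    let halfmove_explanation := "Halfmove clock (for 50-move rule): ".toList ++ halfmove
    let fullmove_explanation := "Fullmove number: ".toList ++ fullmove
    String.ofList (PySem.Chars.join ['\n'] [board_explanation, turn_explanation, castling_explanation,
      en_passant_explanation, halfmove_explanation, fullmove_explanation])
  else ""   -- unreachable under Pre_ (Python's unpacking raises ValueError)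

-- ===== PRECONDITION & SPEC =====
-- Pre_ excludes exactly the inputs where fen.split(' ') does not have 6 parts: there the
-- 6-variable unpacking in BOTH Pythons raises ValueError.
def Pre_explain_fen (fen : String) : Prop := (PySem.Chars.splitOn fen.toList [' ']).length = 6
instance (fen : String) : Decidable (Pre_explain_fen fen) := by unfold Pre_explain_fen; infer_instance
def pvWitness_explain_fen : String := "rnb1kbnr/8 w KQkq - 0 1"

def Spec_explain_fen (fen : String) (out : String) : Prop := out = explain_fen_alt fen
instance (fen : String) (out : String) : Decidable (Spec_explain_fen fen out) := by unfold Spec_explain_fen; infer_instance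

-- ===== CLAIM (what is proved, stated in full; the proofs are below) =====
def Claim_equal_explain_fen : Prop := ∀ (fen : String), Dom_explain_fen fen → Pre_explain_fen fen → Spec_explain_fen fen (explain_fen fen)

-- ===== LEMMAS AND PROOFS =====

-- str.replace with a single-character pattern is a per-character flatMap.
theorem pv_go_single (c : Char) (new : List Char) :
    ∀ (fuel : Nat) (l acc : List Char), l.length ≤ fuel →
      PySem.Chars.replace.go [c] new fuel l acc
        = acc.reverse ++ l.flatMap (fun x => if x = c then new else [x]) := by
  intro fuel
  induction fuel with
  | zero =>
    intro l acc h
    have : l = [] := List.eq_nil_of_length_eq_zero (Nat.le_zero.mp h)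
    subst this
    simp [PySem.Chars.replace.go]
  | succ n ih =>
    intro l acc h
    cases l with
    | nil => simp [PySem.Chars.replace.go]
    | cons x t =>
      by_cases hx : x = c
      · subst hx
        rw [PySem.Chars.replace.go]
        rw [if_pos (by simp [List.isPrefixOf])]
        rw [ih _ _ (by simpa using Nat.le_of_succ_le_succ h)]
        simp
      · rw [PySem.Chars.replace.go]
        rw [if_neg (by simp [List.isPrefixOf, hx, Ne.symm])]
        rw [ih _ _ (by simpa using Nat.le_of_succ_le_succ h)]
        simp [hx]

theorem pv_replace_single (cs : List Char) (c : Char) (new : List Char) :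
    PySem.Chars.replace cs [c] new = cs.flatMap (fun x => if x = c then new else [x]) := by
  rw [PySem.Chars.replace]
  simp only [List.isEmpty]
  exact pv_go_single c new cs.length cs [] (le_refl _) |>.trans (by simp)

theorem pv_join_nil_flatten (l : List (List Char)) :
    PySem.Chars.join [] l = l.flatten := by
  simp only [PySem.Chars.join, List.intercalate]
  induction l with
  | nil => rfl
  | cons a t ih => cases t <;> simp_all

-- the chained replaces of A compute exactly B's one-pass expansion on every row
theorem pv_chain_eq_expand (row : List Char) : pvChainA row = pvExpandB row := by
  unfold pvChainA pvExpandB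
  rw [pv_join_nil_flatten, ← List.flatMap_def]
  simp only [pv_replace_single, List.flatMap_assoc]
  apply List.flatMap_congr
  intro x _
  by_cases h1 : x = '1'; · subst h1; decide
  by_cases h2 : x = '2'; · subst h2; decide
  by_cases h3 : x = '3'; · subst h3; decide
  by_cases h4 : x = '4'; · subst h4; decide
  by_cases h5 : x = '5'; · subst h5; decide
  by_cases h6 : x = '6'; · subst h6; decide
  by_cases h7 : x = '7'; · subst h7; decide
  by_cases h8 : x = '8'; · subst h8; decide
  simp [h1, h2, h3, h4, h5, h6, h7, h8]

theorem pv_match_eq (fen : String) (board turn castling en_passant halfmove fullmove : List Char)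
    (h : PySem.Chars.splitOn fen.toList [' '] = [board, turn, castling, en_passant, halfmove, fullmove]) :
    explain_fen fen = explain_fen_alt fen := by
  unfold explain_fen explain_fen_alt
  rw [h]
  simp only [pv_chain_eq_expand, pv_join_nil_flatten]
  congr 1
  rw [show (fun (acc row : List Char) => acc ++ pvExpandB row ++ ['\n'])
        = fun acc row => acc ++ (pvExpandB row ++ ['\n']) by funext acc row; simp]
  rw [PySem.List.foldl_append_eq_flatMap]
  simp [PySem.Chars.join, List.intercalate, List.flatMap_def]

-- ===== VERDICT (by name: the statement is the Claim_ definition above) =====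
theorem explain_fen_spec : Claim_equal_explain_fen := by
  intro fen _ hpre
  unfold Spec_explain_fen
  unfold Pre_explain_fen at hpre
  rcases hl : PySem.Chars.splitOn fen.toList [' '] with _ | ⟨x1, _ | ⟨x2, _ | ⟨x3, _ | ⟨x4, _ | ⟨x5, _ | ⟨x6, _ | ⟨x7, t⟩⟩⟩⟩⟩⟩⟩ <;>
    rw [hl] at hpre <;> simp at hpre
  exact pv_match_eq fen x1 x2 x3 x4 x5 x6 hl
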